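-- pv_equiv track=rewrite | github.com/c0de-pym/TicTacToe | gameplay.py | framing
-- ===== SOURCE A (Python) =====
-- def framing(framed_text):
--     # creating frame around text
--     next_line='\n'
--     vertical_frame_left="║ "
--     vertical_frame_right=" ║"
--     find_max_row = framed_text
--     rows = find_max_row.split("\n")
--     max_row = 0
--     for row in rows:
--         if len(row) > max_row:
--             max_row = len(row)
--     chart_lenght = (max_row + 2) * "="
--     line_num = 0
--     for row in rows:
--         if len(row) < len(chart_lenght):
--             rows[line_num] =row + " " * (len(chart_lenght)-len(row)-2)
--         line_num += 1
--     framed_text = "\n".join(rows)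
--     output_frame = "╔" + chart_lenght +"╗" + next_line + vertical_frame_left + framed_text.replace(next_line, vertical_frame_right + next_line + vertical_frame_left) + vertical_frame_right + next_line + "╚" + chart_lenght + "╝"
--     return output_frame
-- ===== SOURCE B (Python) =====
-- def framing(framed_text):
--     # simpler: per-line assembly instead of join-then-global-replace
--     rows = framed_text.split("\n")
--     width = max((len(r) for r in rows), default=0)
--     bar = "=" * (width + 2)
--     lines = ["\u2554" + bar + "\u2557"]
--     for r in rows:
--         lines.append("\u2551 " + r.ljust(width) + " \u2551")
--     lines.append("\u255a" + bar + "\u255d")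
--     return "\n".join(lines)
-- ===== Notes on version B (the rewrite author's own statement) =====
-- stated objective: simpler
-- what changed: B frames each row individually (top line, one wrapped padded line per row, bottom line) and joins them once, replacing A's pad-in-place loop plus join-then-global-string-replace border-insertion trick.
import Mathlib
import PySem

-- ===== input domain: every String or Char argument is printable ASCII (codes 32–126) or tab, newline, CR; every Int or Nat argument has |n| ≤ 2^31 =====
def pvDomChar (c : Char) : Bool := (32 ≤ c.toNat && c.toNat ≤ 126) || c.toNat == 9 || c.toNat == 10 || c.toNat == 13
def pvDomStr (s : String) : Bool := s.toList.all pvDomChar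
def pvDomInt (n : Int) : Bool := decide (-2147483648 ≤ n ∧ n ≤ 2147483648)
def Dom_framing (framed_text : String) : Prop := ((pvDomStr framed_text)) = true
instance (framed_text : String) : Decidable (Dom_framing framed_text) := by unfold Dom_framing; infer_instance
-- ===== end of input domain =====

-- B assembles each framed line separately and joins once; A pads rows in place,
-- joins, and inserts the vertical borders with one global string replace. Objective: simpler.

-- ===== PORT A =====
-- literal port of A on List Char (PySem.Chars); '"=" * n' is ported as List.replicate n.toNat
-- (exact: Python's s * n is '' for n ≤ 0, and replicate clamps the same way).
def framing (framed_text : String) : String :=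
  let rows := PySem.Chars.splitOn framed_text.toList ['\n']
  let max_row : Int := rows.foldl (fun m row => if (row.length : Int) > m then (row.length : Int) else m) 0
  let chart := List.replicate (max_row + 2).toNat '='
  -- Python mutates rows[line_num] while iterating; the element is read before being
  -- overwritten and line_num is the iteration index, so this is exactly a map.
  let rows2 := rows.map (fun row =>
    if (row.length : Int) < (chart.length : Int) then
      row ++ List.replicate ((chart.length : Int) - (row.length : Int) - 2).toNat ' '
    else row)
  let body := PySem.Chars.join ['\n'] rows2
  String.ofList
    (['╔'] ++ chart ++ ['╗', '\n', '║', ' ']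
      ++ PySem.Chars.replace body ['\n'] [' ', '║', '\n', '║', ' ']
      ++ [' ', '║', '\n', '╚'] ++ chart ++ ['╝'])

-- ===== PORT B =====
def framing_alt (framed_text : String) : String :=
  let rows := PySem.Chars.splitOn framed_text.toList ['\n']
  let width : Int := PySem.List.maxD (rows.map (fun r => (r.length : Int))) (fun x => x) 0
  let bar := List.replicate (width + 2).toNat '='
  let top := ['╔'] ++ bar ++ ['╗']
  let bottom := ['╚'] ++ bar ++ ['╝']
  let lines := [top] ++ rows.map (fun r => ['║', ' '] ++ (r ++ List.replicate (width - (r.length : Int)).toNat ' ') ++ [' ', '║']) ++ [bottom]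
  String.ofList (PySem.Chars.join ['\n'] lines)

-- ===== PRECONDITION & SPEC =====
def Spec_framing (framed_text : String) (out : String) : Prop := out = framing_alt framed_text
instance (framed_text : String) (out : String) : Decidable (Spec_framing framed_text out) := by unfold Spec_framing; infer_instance

-- ===== CLAIM (what is proved, stated in full; the proofs are below) =====
def Claim_equal_framing : Prop := ∀ (framed_text : String), Dom_framing framed_text → Spec_framing framed_text (framing framed_text)

-- ===== LEMMAS AND PROOFS =====

-- join as flatMap
theorem join_cons (sep a : List Char) (t : List (List Char)) :
    PySem.Chars.join sep (a :: t) = a ++ t.flatMap (fun r => sep ++ r) := by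
  induction t generalizing a with
  | nil => simp [PySem.Chars.join, List.intercalate]
  | cons b t ih =>
    simp only [PySem.Chars.join, List.intercalate] at *
    simp [List.intersperse] at *
    simp [ih b]

-- splitOn.go spec
theorem splitOn_go_spec (c : Char) (fuel : Nat) :
    ∀ (l cur : List Char) (acc : List (List Char)), l.length < fuel → c ∉ cur →
    ∃ rest, PySem.Chars.splitOn.go [c] fuel l cur acc = acc.reverse ++ rest ∧ rest ≠ [] ∧ ∀ r ∈ rest, c ∉ r := by
  induction fuel with
  | zero => intro l cur acc h; omega
  | succ fuel ih =>
    intro l cur acc h hc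
    match l with
    | [] =>
      refine ⟨[cur.reverse], ?_, by simp, ?_⟩
      · simp [PySem.Chars.splitOn.go]
      · intro r hr; simp at hr; subst hr; simpa using hc
    | c' :: t =>
      by_cases hcc : c = c'
      · subst hcc
        have : PySem.Chars.splitOn.go [c] (fuel+1) (c :: t) cur acc
            = PySem.Chars.splitOn.go [c] fuel t [] (cur.reverse :: acc) := by
          simp [PySem.Chars.splitOn.go, List.isPrefixOf]
        obtain ⟨rest, he, hne, hall⟩ := ih t [] (cur.reverse :: acc) (by simp at h ⊢; omega) (by simp)
        refine ⟨cur.reverse :: rest, ?_, by simp, ?_⟩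
        · rw [this, he]; simp
        · intro r hr
          rcases List.mem_cons.mp hr with hr | hr
          · subst hr; simpa using hc
          · exact hall r hr
      · have : PySem.Chars.splitOn.go [c] (fuel+1) (c' :: t) cur acc
            = PySem.Chars.splitOn.go [c] fuel t (c' :: cur) acc := by
          simp [PySem.Chars.splitOn.go, List.isPrefixOf, hcc]
        obtain ⟨rest, he, hne, hall⟩ := ih t (c' :: cur) acc (by simp at h ⊢; omega)
          (by simp [hc, hcc])
        exact ⟨rest, by rw [this, he], hne, hall⟩

theorem splitOn_spec (c : Char) (s : List Char) :
    ∃ rows, PySem.Chars.splitOn s [c] = rows ∧ rows ≠ [] ∧ ∀ r ∈ rows, c ∉ r := by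
  obtain ⟨rest, he, hne, hall⟩ := splitOn_go_spec c (s.length + 1) s [] [] (by omega) (by simp)
  exact ⟨rest, by simpa [PySem.Chars.splitOn] using he, hne, hall⟩

-- replace with single-char old
theorem replace_go_single (c : Char) (new : List Char) (fuel : Nat) :
    ∀ (l acc : List Char), l.length ≤ fuel →
    PySem.Chars.replace.go [c] new fuel l acc
      = acc.reverse ++ l.flatMap (fun ch => if ch = c then new else [ch]) := by
  induction fuel with
  | zero =>
    intro l acc h
    have : l = [] := by cases l <;> simp_all
    subst this; simp [PySem.Chars.replace.go]
  | succ fuel ih =>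
    intro l acc h
    match l with
    | [] => simp [PySem.Chars.replace.go]
    | c' :: t =>
      by_cases hcc : c = c'
      · subst hcc
        have : PySem.Chars.replace.go [c] new (fuel+1) (c :: t) acc
            = PySem.Chars.replace.go [c] new fuel t (new.reverse ++ acc) := by
          simp [PySem.Chars.replace.go, List.isPrefixOf]
        rw [this, ih t _ (by simp at h ⊢; omega)]
        simp
      · have : PySem.Chars.replace.go [c] new (fuel+1) (c' :: t) acc
            = PySem.Chars.replace.go [c] new fuel t (c' :: acc) := by
          simp [PySem.Chars.replace.go, List.isPrefixOf, hcc]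
        rw [this, ih t _ (by simp at h ⊢; omega)]
        simp [Ne.symm hcc]

theorem replace_single (c : Char) (s new : List Char) :
    PySem.Chars.replace s [c] new = s.flatMap (fun ch => if ch = c then new else [ch]) := by
  rw [PySem.Chars.replace]
  simp [replace_go_single c new s.length s [] le_rfl]

theorem flatMap_id_of_not_mem (c : Char) (new a : List Char) (h : c ∉ a) :
    a.flatMap (fun ch => if ch = c then new else [ch]) = a := by
  induction a with
  | nil => simp
  | cons x t ih =>
    simp only [List.mem_cons, not_or] at h
    simp [List.flatMap_cons, Ne.symm, h.1, ih h.2]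

theorem flatMap_join (c : Char) (new : List Char) (l : List (List Char))
    (h : ∀ r ∈ l, c ∉ r) :
    (PySem.Chars.join [c] l).flatMap (fun ch => if ch = c then new else [ch])
      = PySem.Chars.join new l := by
  match l with
  | [] => simp [PySem.Chars.join, List.intercalate]
  | a :: t =>
    rw [join_cons, join_cons]
    rw [List.flatMap_append, List.flatMap_assoc]
    rw [flatMap_id_of_not_mem c new a (h a (by simp))]
    congr 1
    apply List.flatMap_congr
    intro r hr
    rw [List.flatMap_append, flatMap_id_of_not_mem c new r (h r (by simp [hr]))]
    simp

-- wrapping each line individually vs inserting borders by global replace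
theorem wrapAux (t : List (List Char)) :
    List.flatMap (fun r => [' ', '║', '\n', '║', ' '] ++ r) t ++ [' ', '║']
      = [' ', '║'] ++ List.flatMap (fun r => ['\n'] ++ (['║', ' '] ++ r ++ [' ', '║'])) t := by
  induction t with
  | nil => simp
  | cons r t ih =>
    simp only [List.flatMap_cons, List.cons_append, List.nil_append, List.append_assoc] at ih ⊢
    rw [ih]

-- max bookkeeping
theorem maxD_cons : ∀ (t : List Int) (x : Int), PySem.List.maxD (x :: t) (fun y => y) 0 = t.foldl max x := by
  intro t
  induction t with
  | nil => intro x; rfl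
  | cons y t ih =>
    intro x
    simp only [PySem.List.maxD, PySem.List.max?, List.foldl_cons] at ih ⊢
    by_cases h : x < y
    · have := ih y
      simp only [max_eq_right h.le]
      simpa [h] using this
    · have := ih x
      simp only [max_eq_left (not_lt.mp h)]
      simpa [h] using this

theorem foldl_if_max (l : List (List Char)) (a : Int) :
    l.foldl (fun m row => if ((row.length : Int)) > m then (row.length : Int) else m) a
      = (l.map (fun r => (r.length : Int))).foldl max a := by
  rw [List.foldl_map]
  congr 1
  funext m r
  by_cases h : (r.length : Int) > m <;> simp [h] <;> omega

theorem assemble (chart a : List Char) (t : List (List Char)) :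
    ['╔'] ++ chart ++ ['╗', '\n', '║', ' '] ++ PySem.Chars.join [' ', '║', '\n', '║', ' '] (a :: t) ++ [' ', '║', '\n', '╚'] ++ chart ++ ['╝']
      = PySem.Chars.join ['\n'] ([['╔'] ++ chart ++ ['╗']] ++ (a :: t).map (fun r => ['║', ' '] ++ r ++ [' ', '║']) ++ [['╚'] ++ chart ++ ['╝']]) := by
  have hw := wrapAux t
  simp only [join_cons, List.flatMap_append, List.flatMap_cons, List.flatMap_nil, List.flatMap_map,
    List.append_nil, List.map_cons, List.cons_append, List.nil_append, List.append_assoc] at hw ⊢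
  have regroup : ∀ (x rest : List Char), x ++ ' ' :: '║' :: rest = (x ++ [' ', '║']) ++ rest := by
    intro x rest; simp
  rw [regroup, hw]
  simp

theorem main (s : String) : framing s = framing_alt s := by
  simp only [framing, framing_alt]
  obtain ⟨rows, hrows, hne, hnonl⟩ := splitOn_spec '\n' s.toList
  rw [hrows]
  obtain ⟨r0, rt, rfl⟩ := List.exists_cons_of_ne_nil hne
  rw [foldl_if_max]
  set M : Int := (((r0 :: rt).map (fun r => (r.length : Int))).foldl max 0) with hM
  -- bounds on M
  have hb := PySem.List.le_foldl_max_int (r0 :: rt) (fun r => ((r.length : Nat) : Int)) 0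
  have hfm : M = List.foldl (fun acc (y : List Char) => max acc ((y.length : Nat) : Int)) 0 (r0 :: rt) := by
    rw [hM, List.foldl_map]
  have hM0 : (0 : Int) ≤ M := by rw [hfm]; exact hb.1
  have hMb : ∀ r ∈ (r0 :: rt), ((r.length : Nat) : Int) ≤ M := by
    intro r hr; rw [hfm]; exact hb.2 r hr
  -- B's width is M
  have hw : PySem.List.maxD ((r0 :: rt).map (fun r => (r.length : Int))) (fun x => x) 0 = M := by
    rw [List.map_cons, maxD_cons, hM, List.map_cons, List.foldl_cons,
      max_eq_right (Int.natCast_nonneg _)]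
  rw [hw]
  have hlen : (((M + 2).toNat : Nat) : Int) = M + 2 := Int.toNat_of_nonneg (by omega)
  have hpad : List.map
      (fun row => if ((row.length : Nat) : Int) < (((List.replicate (M + 2).toNat '=').length : Nat) : Int) then
          row ++ List.replicate ((((List.replicate (M + 2).toNat '=').length : Nat) : Int) - (row.length : Int) - 2).toNat ' '
        else row) (r0 :: rt)
      = List.map (fun r => r ++ List.replicate (M - (r.length : Int)).toNat ' ') (r0 :: rt) := by
    apply List.map_congr_left
    intro r hr
    have h1 := hMb r hr
    rw [List.length_replicate, hlen]
    rw [if_pos (by omega)]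
    congr 2
    omega
  rw [hpad]
  have hnl2 : ∀ r ∈ List.map (fun r => r ++ List.replicate (M - (r.length : Int)).toNat ' ') (r0 :: rt), '\n' ∉ r := by
    intro r hr
    obtain ⟨r', hr', rfl⟩ := List.mem_map.mp hr
    intro hmem
    rcases List.mem_append.mp hmem with h | h
    · exact hnonl r' hr' h
    · simpa using List.eq_of_mem_replicate h
  rw [replace_single, flatMap_join '\n' _ _ hnl2]
  have hcomp : List.map (fun r => ['║', ' '] ++ (r ++ List.replicate (M - (r.length : Int)).toNat ' ') ++ [' ', '║']) (r0 :: rt)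
      = List.map (fun r => ['║', ' '] ++ r ++ [' ', '║']) (List.map (fun r => r ++ List.replicate (M - (r.length : Int)).toNat ' ') (r0 :: rt)) := by
    rw [List.map_map]
    rfl
  rw [hcomp]
  simp only [List.map_cons]
  exact congrArg String.ofList (assemble (List.replicate (M + 2).toNat '=') _ _)

-- ===== VERDICT (by name: the statement is the Claim_ definition above) =====
theorem framing_spec : Claim_equal_framing := by
  intro framed_text _
  exact main framed_text
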